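-- pv_equiv track=rewrite | github.com/rabiNyoom/Ege-Inf_2025-2026 | ФИПИ/Статград/27.01/23.py | f
-- ===== SOURCE A (Python) =====
-- def f(a, b, fl=False):
--     if a > b or a in [17, 28]:
--         return 0
--     if a == b and fl:
--         return 1
--     if a in [14, 18]:
--         fl = True
--     return f(a+2, b, fl) + f(a+3, b, fl) + f(a*2, b, fl)
-- ===== SOURCE B (Python) =====
-- def f(a, b, fl=False):
--     # bottom-up DP over (x, flag) for x from b down to a; each state is computed once
--     if a > b or a in (17, 28):
--         return 0
--     memo = {}
--     x = b
--     while x >= a: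
--         for g in (False, True):
--             if x in (17, 28):
--                 memo[(x, g)] = 0
--             elif x == b and g:
--                 memo[(x, g)] = 1
--             else:
--                 h = g or x in (14, 18)
--                 memo[(x, g)] = sum(memo.get((y, h), 0) for y in (x + 2, x + 3, x * 2) if y <= b)
--         x -= 1
--     return memo[(a, fl)]
-- ===== Notes on version B (the rewrite author's own statement) =====
-- stated objective: alternative
-- what changed: Replaced the three-way branching recursion with a bottom-up dynamic program that fills a memo table over states (x, flag) from b down to a, so each state is computed once.
import Mathlib
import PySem

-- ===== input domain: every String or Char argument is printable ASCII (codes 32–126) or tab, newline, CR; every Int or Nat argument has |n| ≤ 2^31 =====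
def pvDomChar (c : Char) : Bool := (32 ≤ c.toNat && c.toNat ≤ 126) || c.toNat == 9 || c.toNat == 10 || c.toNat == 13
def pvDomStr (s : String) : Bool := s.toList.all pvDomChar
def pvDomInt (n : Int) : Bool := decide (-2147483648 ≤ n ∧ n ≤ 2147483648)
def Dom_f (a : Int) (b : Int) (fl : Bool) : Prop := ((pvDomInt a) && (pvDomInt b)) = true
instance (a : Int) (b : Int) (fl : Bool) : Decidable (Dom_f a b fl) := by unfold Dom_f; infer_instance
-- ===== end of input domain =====

-- B replaces A's three-way branching recursion by a bottom-up DP table over (x, flag), each state computed once; equivalence proved on Pre_f.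

-- ===== PORT A =====
-- Literal transliteration of A's recursion; the fuel (b-a).toNat+1 only makes the
-- recursion total in Lean (on Pre_f each recursive call strictly increases a, so the
-- fuel never runs out and never alters the computed value).
def fAux : Nat → Int → Int → Bool → Int
  | 0, _, _, _ => 0
  | n+1, a, b, fl =>
    if b < a ∨ a = 17 ∨ a = 28 then 0
    else if a = b ∧ fl then 1
    else
      let fl' := fl || (a = 14 || a = 18)
      fAux n (a+2) b fl' + fAux n (a+3) b fl' + fAux n (a*2) b fl'

-- fuel 0 outside the terminating region a ≥ 1 ∨ b < a (there Python A raises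
-- RecursionError, so any value is fine and evaluation must still be fast)
def f (a : Int) (b : Int) (fl : Bool) : Int :=
  if 1 ≤ a ∨ b < a then fAux ((b - a).toNat + 1) a b fl else 0

-- ===== PORT B =====
-- one table entry: the value stored for (x, g) by Source B's inner loop body
def fCell (b x : Int) (g : Bool) (memo : Std.HashMap (Int × Bool) Int) : Int :=
  if x = 17 ∨ x = 28 then 0
  else if x = b ∧ g then 1
  else
    let h := g || (x = 14 || x = 18)
    (if x+2 ≤ b then memo.getD (x+2, h) 0 else 0) +
    (if x+3 ≤ b then memo.getD (x+3, h) 0 else 0) +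
    (if x*2 ≤ b then memo.getD (x*2, h) 0 else 0)

-- one iteration of the while body: fills (x, False) then (x, True)
-- (the Python dict with O(1) get/set is ported as Std.HashMap)
def fStep (b x : Int) (memo : Std.HashMap (Int × Bool) Int) : Std.HashMap (Int × Bool) Int :=
  let m1 := memo.insert (x, false) (fCell b x false memo)
  m1.insert (x, true) (fCell b x true m1)

-- the while loop: n remaining iterations, current x
def fLoop : Nat → Int → Int → Std.HashMap (Int × Bool) Int → Std.HashMap (Int × Bool) Int
  | 0, _, _, m => m
  | n+1, x, b, m => fLoop n (x-1) b (fStep b x m)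

def f_alt (a : Int) (b : Int) (fl : Bool) : Int :=
  if b < a ∨ a = 17 ∨ a = 28 then 0
  else (fLoop ((b - a).toNat + 1) b b Std.HashMap.emptyWithCapacity).getD (a, fl) 0

-- ===== PRECONDITION & SPEC =====
-- Pre_f excludes a ≤ 0 with a ≤ b: there the chain a ↦ a*2 never passes a > b and
-- Python A raises RecursionError (it returns on no such input).
def Pre_f (a : Int) (b : Int) (fl : Bool) : Prop := 1 ≤ a ∨ b < a
instance (a : Int) (b : Int) (fl : Bool) : Decidable (Pre_f a b fl) := by unfold Pre_f; infer_instance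
def pvWitness_f : Int × Int × Bool := (1, 12, false)

def Spec_f (a : Int) (b : Int) (fl : Bool) (out : Int) : Prop := out = f_alt a b fl
instance (a : Int) (b : Int) (fl : Bool) (out : Int) : Decidable (Spec_f a b fl out) := by unfold Spec_f; infer_instance

-- ===== CLAIM (what is proved, stated in full; the proofs are below) =====
def Claim_equal_f : Prop := ∀ (a : Int) (b : Int) (fl : Bool), Dom_f a b fl → Pre_f a b fl → Spec_f a b fl (f a b fl)

-- ===== LEMMAS AND PROOFS =====

-- A's recursion returns 0 immediately past b, at any fuel
lemma fAux_gt (n : Nat) (a b : Int) (fl : Bool) (h : b < a) : fAux n a b fl = 0 := by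
  cases n <;> simp [fAux, h]

-- fuel irrelevance for 1 ≤ a once the fuel exceeds b - a
lemma fAux_stable : ∀ (n m : Nat) (a b : Int) (fl : Bool), 1 ≤ a →
    (b - a).toNat < n → (b - a).toNat < m → fAux n a b fl = fAux m a b fl := by
  intro n
  induction n with
  | zero => intro m a b fl _ hn _; omega
  | succ n ih =>
    intro m a b fl ha hn hm
    cases m with
    | zero => omega
    | succ m =>
      by_cases hgt : b < a
      · rw [fAux_gt _ _ _ _ hgt, fAux_gt _ _ _ _ hgt]
      · simp only [fAux]
        split
        · rfl
        · split
          · rfl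
          · have hab : a ≤ b := by omega
            have step : ∀ (y : Int) (g : Bool), a + 1 ≤ y → fAux n y b g = fAux m y b g := by
              intro y g hy
              by_cases hyb : b < y
              · rw [fAux_gt _ _ _ _ hyb, fAux_gt _ _ _ _ hyb]
              · exact ih m y b g (by omega) (by omega) (by omega)
            rw [step (a+2) _ (by omega), step (a+3) _ (by omega), step (a*2) _ (by omega)]

-- the canonical value of A at state (x, g)
def fVal (x b : Int) (g : Bool) : Int := fAux ((b - x).toNat + 1) x b g

-- table invariant: memo agrees with fVal for all states from k up to b
def MemInv (m : Std.HashMap (Int × Bool) Int) (k b : Int) : Prop :=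
  ∀ (x : Int) (g : Bool), k ≤ x → x ≤ b → m.getD (x, g) 0 = fVal x b g

-- fCell computes fVal at x from a table valid above x
lemma fCell_val (b x : Int) (m : Std.HashMap (Int × Bool) Int)
    (hx1 : 1 ≤ x) (hxb : x ≤ b) (hm : MemInv m (x+1) b) (g : Bool) :
    fCell b x g m = fVal x b g := by
  have child : ∀ (y : Int) (h : Bool), x + 1 ≤ y →
      (if y ≤ b then m.getD (y, h) 0 else 0) = fAux ((b - x).toNat) y b h := by
    intro y h hy
    by_cases hyb : y ≤ b
    · rw [if_pos hyb, hm y h hy hyb]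
      exact (fAux_stable _ _ y b h (by omega) (by omega) (by omega)).symm
    · rw [if_neg hyb, fAux_gt _ _ _ _ (by omega)]
  unfold fCell fVal
  simp only [fAux]
  have hnot : ¬ b < x := by omega
  by_cases h17 : x = 17 ∨ x = 28
  · rw [if_pos h17, if_pos (Or.inr h17)]
  · rw [if_neg h17, if_neg (by tauto : ¬ (b < x ∨ x = 17 ∨ x = 28))]
    by_cases hbg : x = b ∧ g
    · rw [if_pos hbg, if_pos hbg]
    · rw [if_neg hbg, if_neg hbg]
      rw [child (x+2) _ (by omega), child (x+3) _ (by omega), child (x*2) _ (by omega)]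

-- inserting at x preserves the invariant above x and establishes it at x
lemma fStep_inv (b x : Int) (m : Std.HashMap (Int × Bool) Int)
    (hx1 : 1 ≤ x) (hxb : x ≤ b) (hm : MemInv m (x+1) b) : MemInv (fStep b x m) x b := by
  intro y g hy hyb
  unfold fStep
  have hcf := fCell_val b x m hx1 hxb hm false
  have m1inv : MemInv (m.insert (x, false) (fCell b x false m)) (x+1) b := by
    intro z h hz hzb
    rw [Std.HashMap.getD_insert]
    rw [if_neg (by simp; intro he; omega)]
    exact hm z h hz hzb
  have hct := fCell_val b x (m.insert (x, false) (fCell b x false m)) hx1 hxb m1inv true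
  rw [Std.HashMap.getD_insert]
  by_cases hyx : y = x
  · subst hyx
    cases g
    · rw [if_neg (by simp), Std.HashMap.getD_insert, if_pos (by simp), hcf]
    · rw [if_pos (by simp), hct]
  · rw [if_neg (by simp; intro he; exact absurd he.symm hyx)]
    rw [Std.HashMap.getD_insert, if_neg (by simp; intro he; exact absurd he.symm hyx)]
    exact hm y g (by omega) hyb

-- running the loop n steps down from x extends the invariant down to x - n + 1
lemma fLoop_inv : ∀ (n : Nat) (x b : Int) (m : Std.HashMap (Int × Bool) Int),
    x ≤ b → 1 ≤ x - n + 1 → MemInv m (x+1) b → MemInv (fLoop n x b m) (x - n + 1) b := by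
  intro n
  induction n with
  | zero => intro x b m _ _ hm; simpa using hm
  | succ n ih =>
    intro x b m hxb h1 hm
    have hstep := fStep_inv b x m (by omega) hxb hm
    have := ih (x-1) b (fStep b x m) (by omega) (by omega) (by simpa using hstep)
    simp only [fLoop]
    have heq : x - 1 - (n : Int) + 1 = x - ((n : Nat) + 1 : Nat) + 1 := by push_cast; ring
    rw [← heq]
    exact this

-- ===== VERDICT (by name: the statement is the Claim_ definition above) =====
theorem f_spec : Claim_equal_f := by
  intro a b fl _ hpre
  unfold Spec_f f f_alt
  rw [if_pos (show 1 ≤ a ∨ b < a from hpre)]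
  by_cases hgt : b < a ∨ a = 17 ∨ a = 28
  · rw [if_pos hgt]
    rcases hgt with hgt | h17
    · exact fAux_gt _ _ _ _ hgt
    · simp [fAux, h17]
  · rw [if_neg hgt]
    have hgt : ¬ b < a := fun h => hgt (Or.inl h)
    have ha : 1 ≤ a := by cases hpre with
      | inl h => exact h
      | inr h => omega
    have hinv := fLoop_inv ((b - a).toNat + 1) b b Std.HashMap.emptyWithCapacity (le_refl b)
      (by omega) (by intro z g hz hzb; omega)
    have hval := hinv a fl (by omega) (by omega)
    rw [hval]; rfl
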